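-- pv_equiv track=rewrite | github.com/LilianSOLER/JeuQuille | Projet Programmation impérative S1/MoteurDeJeu.py | afficheQuilles
-- ===== SOURCE A (Python) =====
-- def afficheQuilles(q,n):
--     ligneQuille=""
--     l=0
--     if q!=[]:
--         if q[0][0]!=0:
--             ligneQuille="."*(q[0][0])
--         while l+1<len(q):
--             ligneQuille=ligneQuille+"|"*(q[l][1]-q[l][0]+1)
--             ligneQuille=ligneQuille+"."*(q[l+1][0]-q[l][1]-1)
--             l=l+1
--         ligneQuille=ligneQuille+"|"*(q[l][1]-q[l][0]+1)
--         ligneQuille=ligneQuille+"."*(n-q[l][1]-1)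
--     else :
--         ligneQuille=ligneQuille+n*"."
--
--     return ligneQuille
-- ===== SOURCE B (Python) =====
-- def afficheQuilles(q, n):
--     if not q:
--         return "." * n
--     a, b = q[-1]
--     return afficheQuilles(q[:-1], a) + "|" * (b - a + 1) + "." * (n - b - 1)
-- ===== Notes on version B (the rewrite author's own statement) =====
-- stated objective: simpler
-- what changed: Replaced A's forward index-based while loop with look-ahead q[l+1], the empty-list branch and the first-pin leading-dot special case by a three-line recursion that peels the LAST interval off and calls itself on the prefix with the board size shrunk to that interval's start.
import Mathlib
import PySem

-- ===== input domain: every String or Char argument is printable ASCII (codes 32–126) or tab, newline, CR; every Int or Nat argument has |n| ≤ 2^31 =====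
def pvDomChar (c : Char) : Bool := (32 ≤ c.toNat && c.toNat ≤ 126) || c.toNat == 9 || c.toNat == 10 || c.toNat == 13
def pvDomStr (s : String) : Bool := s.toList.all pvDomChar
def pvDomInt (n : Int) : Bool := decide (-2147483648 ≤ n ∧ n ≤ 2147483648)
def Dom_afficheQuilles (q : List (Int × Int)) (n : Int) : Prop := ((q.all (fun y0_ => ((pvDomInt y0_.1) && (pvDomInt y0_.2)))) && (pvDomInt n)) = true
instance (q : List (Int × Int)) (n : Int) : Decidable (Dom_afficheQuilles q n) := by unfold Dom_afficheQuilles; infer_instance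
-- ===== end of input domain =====

-- B replaces A's forward index-based while loop (look-ahead q[l+1], empty-list branch,
-- first-pin special case) by a right-to-left recursion: peel the last interval, recurse
-- on the prefix with the board size shrunk to its start; same return value (simpler).

-- ===== PORT A =====
-- the while loop: 'while l+1 < len(q): ligneQuille += "|"*... + "."*...; l += 1'
def afficheQuillesLoopA (q : List (Int × Int)) (l : Nat) (acc : List Char) : List Char :=
  if l + 1 < q.length then
    afficheQuillesLoopA q (l + 1)
      (acc ++ PySem.List.pyRepeat ['|'] ((q.getD l (0, 0)).2 - (q.getD l (0, 0)).1 + 1)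
           ++ PySem.List.pyRepeat ['.'] ((q.getD (l + 1) (0, 0)).1 - (q.getD l (0, 0)).2 - 1))
  else acc
termination_by q.length - l

def afficheQuilles (q : List (Int × Int)) (n : Int) : String :=
  if q ≠ [] then
    let acc0 : List Char :=
      if (q.getD 0 (0, 0)).1 ≠ 0 then PySem.List.pyRepeat ['.'] (q.getD 0 (0, 0)).1 else []
    let acc1 := afficheQuillesLoopA q 0 acc0
    let l := q.length - 1
    String.ofList
      (acc1 ++ PySem.List.pyRepeat ['|'] ((q.getD l (0, 0)).2 - (q.getD l (0, 0)).1 + 1)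
            ++ PySem.List.pyRepeat ['.'] (n - (q.getD l (0, 0)).2 - 1))
  else String.ofList (PySem.List.pyRepeat ['.'] n)

-- ===== PORT B =====
-- Source B's recursion, on List Char ('if not q: "."*n; a,b = q[-1]; recurse on q[:-1] with n := a')
def afficheQuillesAltChars (q : List (Int × Int)) (n : Int) : List Char :=
  if hq : q = [] then PySem.List.pyRepeat ['.'] n
  else
    afficheQuillesAltChars q.dropLast (q.getLast hq).1
      ++ PySem.List.pyRepeat ['|'] ((q.getLast hq).2 - (q.getLast hq).1 + 1)
      ++ PySem.List.pyRepeat ['.'] (n - (q.getLast hq).2 - 1)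
termination_by q.length
decreasing_by
  simpa [List.length_dropLast] using Nat.sub_lt (List.length_pos_of_ne_nil hq) Nat.one_pos

def afficheQuilles_alt (q : List (Int × Int)) (n : Int) : String :=
  String.ofList (afficheQuillesAltChars q n)

-- ===== PRECONDITION & SPEC =====
def Spec_afficheQuilles (q : List (Int × Int)) (n : Int) (out : String) : Prop := out = afficheQuilles_alt q n
instance (q : List (Int × Int)) (n : Int) (out : String) : Decidable (Spec_afficheQuilles q n out) := by unfold Spec_afficheQuilles; infer_instance

-- ===== CLAIM (what is proved, stated in full; the proofs are below) =====
def Claim_equal_afficheQuilles : Prop := ∀ (q : List (Int × Int)) (n : Int), Dom_afficheQuilles q n → Spec_afficheQuilles q n (afficheQuilles q n)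

-- ===== LEMMAS AND PROOFS =====

-- common reference form: emit dots up to the next interval start, bars across it, recurse
def pvSpec (q : List (Int × Int)) (cursor n : Int) : List Char :=
  match q with
  | [] => PySem.List.pyRepeat ['.'] (n - cursor)
  | (a, b) :: rest =>
      PySem.List.pyRepeat ['.'] (a - cursor) ++ PySem.List.pyRepeat ['|'] (b - a + 1)
        ++ pvSpec rest (b + 1) n

lemma pvSpec_snoc (q : List (Int × Int)) (a b c n : Int) :
    pvSpec (q ++ [(a, b)]) c n
      = pvSpec q c a ++ PySem.List.pyRepeat ['|'] (b - a + 1)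
          ++ PySem.List.pyRepeat ['.'] (n - b - 1) := by
  induction q generalizing c with
  | nil => simp [pvSpec, show n - (b + 1) = n - b - 1 from by ring]
  | cons ab rest ih =>
    obtain ⟨x, y⟩ := ab
    simp [pvSpec, ih]

lemma pv_alt_eq_spec (q : List (Int × Int)) (n : Int) :
    afficheQuilles_alt q n = String.ofList (pvSpec q 0 n) := by
  unfold afficheQuilles_alt
  congr 1
  induction q using List.reverseRecOn generalizing n with
  | nil => simp [afficheQuillesAltChars, pvSpec]
  | append_singleton q' ab ih =>
    obtain ⟨a, b⟩ := ab
    rw [afficheQuillesAltChars]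
    simp only [List.getLast_concat, List.dropLast_concat,
      dif_neg (by simp : ¬ (q' ++ [((a : Int), (b : Int))] = []))]
    rw [ih, pvSpec_snoc]

-- the tail produced by A's loop + final appends, starting at interval list t (nonempty)
def pvTail (t : List (Int × Int)) (n : Int) : List Char :=
  match t with
  | [] => []
  | (a, b) :: rest => PySem.List.pyRepeat ['|'] (b - a + 1) ++ pvSpec rest (b + 1) n

lemma pv_loopA (n : Int) (q : List (Int × Int)) :
    ∀ (k l : Nat) (acc : List Char), q.length - l = k + 1 → l < q.length →
      afficheQuillesLoopA q l acc
        ++ PySem.List.pyRepeat ['|']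
             ((q.getD (q.length - 1) (0, 0)).2 - (q.getD (q.length - 1) (0, 0)).1 + 1)
        ++ PySem.List.pyRepeat ['.'] (n - (q.getD (q.length - 1) (0, 0)).2 - 1)
      = acc ++ pvTail (q.drop l) n := by
  intro k
  induction k with
  | zero =>
    intro l acc hk hl
    have hlast : l = q.length - 1 := by omega
    have hnot : ¬ l + 1 < q.length := by omega
    rw [afficheQuillesLoopA, if_neg hnot]
    have hdrop : q.drop l = [q[l]] := by
      have : q.drop l = q[l] :: q.drop (l + 1) := List.drop_eq_getElem_cons hl
      rw [this, List.drop_eq_nil_of_le (by omega)]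
    rcases hq : q[l]'hl with ⟨a, b⟩
    rw [hdrop]
    subst hlast
    simp [pvTail, pvSpec, List.getElem?_eq_getElem hl, hq, List.append_assoc]
    omega
  | succ k ih =>
    intro l acc hk hl
    have hlt : l + 1 < q.length := by omega
    rw [afficheQuillesLoopA, if_pos hlt]
    rw [ih (l + 1) _ (by omega) hlt]
    have hdl : q.drop l = q[l] :: q.drop (l + 1) := List.drop_eq_getElem_cons hl
    have hdl1 : q.drop (l + 1) = q[l + 1] :: q.drop (l + 2) := List.drop_eq_getElem_cons hlt
    rcases h1 : q[l]'hl with ⟨a, b⟩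
    rcases h2 : q[l + 1]'hlt with ⟨a', b'⟩
    rw [hdl, hdl1]
    simp [pvTail, pvSpec, List.getElem?_eq_getElem hl, List.getElem?_eq_getElem hlt,
      h1, h2, List.append_assoc]
    omega

lemma pv_a_eq_spec (q : List (Int × Int)) (n : Int) :
    afficheQuilles q n = String.ofList (pvSpec q 0 n) := by
  cases q with
  | nil => simp [afficheQuilles, pvSpec]
  | cons ab rest =>
    obtain ⟨a, b⟩ := ab
    unfold afficheQuilles
    rw [if_pos (by simp)]
    have hlen : 0 < ((a, b) :: rest).length := by simp
    have hloop := pv_loopA n ((a, b) :: rest) (((a, b) :: rest).length - 1) 0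
      (if ((((a, b) :: rest).getD 0 (0, 0)).1 ≠ 0)
        then PySem.List.pyRepeat ['.'] (((a, b) :: rest).getD 0 (0, 0)).1 else [])
      (by simp) hlen
    simp only [List.append_assoc] at hloop ⊢
    rw [hloop]
    have hlead : (if ((((a, b) :: rest).getD 0 (0, 0)).1 ≠ 0)
        then PySem.List.pyRepeat ['.'] (((a, b) :: rest).getD 0 (0, 0)).1 else [])
        = PySem.List.pyRepeat ['.'] a := by
      by_cases h : a = 0 <;> simp [h, PySem.List.pyRepeat_singleton]
    rw [hlead]
    simp only [List.drop_zero]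
    simp [pvTail, pvSpec]

-- ===== VERDICT (by name: the statement is the Claim_ definition above) =====
theorem afficheQuilles_spec : Claim_equal_afficheQuilles := by
  intro q n _
  unfold Spec_afficheQuilles
  rw [pv_a_eq_spec, pv_alt_eq_spec]
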